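-- pv_equiv track=rewrite | github.com/nabapal/accessvault | backend/app/services/telco_collector.py | _parse_l3out_binding
-- ===== SOURCE A (Python) =====
-- def _parse_l3out_binding(dn: str | None) -> str | None:
--     if not dn or "out-" not in dn:
--         return None
--     tenant = None
--     l3out = None
--     node_profile = None
--     interface_profile = None
--     for segment in dn.split("/"):
--         lower = segment.lower()
--         if segment.startswith("tn-"):
--             tenant = segment[3:]
--         elif segment.startswith("out-"):
--             l3out = segment[4:]
--         elif lower.startswith("lnodep-"):
--             node_profile = segment.split("-", 1)[1]
--         elif lower.startswith("lifp-"):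
--             interface_profile = segment.split("-", 1)[1]
--     parts = [part for part in [tenant, l3out, node_profile, interface_profile] if part]
--     if parts:
--         return " / ".join(parts)
--     return None
-- ===== SOURCE B (Python) =====
-- def _parse_l3out_binding(dn):
--     if not dn or "out-" not in dn:
--         return None
--     segments = dn.split("/")
--
--     def last_field(pred, extract):
--         # last-match-wins == first match scanning from the end
--         for seg in reversed(segments):
--             if pred(seg):
--                 return extract(seg)
--         return None
--
--     fields = [
--         last_field(lambda s: s.startswith("tn-"), lambda s: s[3:]),
--         last_field(lambda s: s.startswith("out-"), lambda s: s[4:]),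
--         last_field(lambda s: s.lower().startswith("lnodep-"), lambda s: s.split("-", 1)[1]),
--         last_field(lambda s: s.lower().startswith("lifp-"), lambda s: s.split("-", 1)[1]),
--     ]
--     parts = [f for f in fields if f]
--     return " / ".join(parts) if parts else None
-- ===== Notes on version B (the rewrite author's own statement) =====
-- stated objective: alternative
-- what changed: Replaces the single left-to-right loop that overwrites four accumulator variables by four independent backward scans over the segments, each returning the first (i.e. last-in-order) segment matching its field's prefix; the mutually exclusive prefixes make the elif chain redundant.
import Mathlib
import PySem

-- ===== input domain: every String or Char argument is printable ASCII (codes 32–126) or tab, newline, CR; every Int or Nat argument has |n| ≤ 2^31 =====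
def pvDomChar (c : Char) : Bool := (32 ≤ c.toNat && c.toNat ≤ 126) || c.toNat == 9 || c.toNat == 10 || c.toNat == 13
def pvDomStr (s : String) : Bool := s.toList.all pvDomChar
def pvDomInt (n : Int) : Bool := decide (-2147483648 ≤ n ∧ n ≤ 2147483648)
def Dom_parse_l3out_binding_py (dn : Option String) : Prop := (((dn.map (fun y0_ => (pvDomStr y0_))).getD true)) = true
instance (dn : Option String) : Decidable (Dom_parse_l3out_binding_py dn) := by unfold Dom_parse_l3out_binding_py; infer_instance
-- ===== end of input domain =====

-- B replaces A's single overwrite-loop by four independent backward scans (one per field); same cost, alternative structure.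


-- ===== PORT A =====
-- the loop body of A: each branch sets exactly one of the four variables
def pvAStep (st : Option String × Option String × Option String × Option String)
    (segment : String) : Option String × Option String × Option String × Option String :=
  let lower := PySem.Str.lower segment
  if PySem.Str.startswith segment "tn-" then
    (some (PySem.Str.slice segment (some 3) none), st.2.1, st.2.2.1, st.2.2.2)
  else if PySem.Str.startswith segment "out-" then
    (st.1, some (PySem.Str.slice segment (some 4) none), st.2.2.1, st.2.2.2)
  else if PySem.Str.startswith lower "lnodep-" then
    -- segment.split("-", 1)[1]; the indexing cannot raise here (the guard ensures a '-')
    (st.1, st.2.1, PySem.List.pyGet? ((PySem.Str.splitMax? segment "-" 1).getD []) 1, st.2.2.2)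
  else if PySem.Str.startswith lower "lifp-" then
    (st.1, st.2.1, st.2.2.1, PySem.List.pyGet? ((PySem.Str.splitMax? segment "-" 1).getD []) 1)
  else st

def parse_l3out_binding_py (dn : Option String) : Option String :=
  match dn with
  | none => none
  | some d =>
    if d == "" || !(PySem.Str.isIn "out-" d) then none
    else
      let st := ((PySem.Str.split? d "/").getD []).foldl pvAStep (none, none, none, none)
      let parts := ([st.1, st.2.1, st.2.2.1, st.2.2.2].filterMap id).filter (fun p => p != "")
      if parts.isEmpty then none else some (PySem.Str.join " / " parts)

-- ===== PORT B =====
-- Source B's last_field: first match scanning the segments from the end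
def pvLastField (segments : List String) (pred : String → Bool)
    (extract : String → Option String) : Option String :=
  match segments.reverse.find? pred with
  | some s => extract s
  | none => none

def parse_l3out_binding_py_alt (dn : Option String) : Option String :=
  match dn with
  | none => none
  | some d =>
    if d == "" || !(PySem.Str.isIn "out-" d) then none
    else
      let segments := (PySem.Str.split? d "/").getD []
      let fields :=
        [pvLastField segments (fun s => PySem.Str.startswith s "tn-")
            (fun s => some (PySem.Str.slice s (some 3) none)),
         pvLastField segments (fun s => PySem.Str.startswith s "out-")
            (fun s => some (PySem.Str.slice s (some 4) none)),
         pvLastField segments (fun s => PySem.Str.startswith (PySem.Str.lower s) "lnodep-")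
            (fun s => PySem.List.pyGet? ((PySem.Str.splitMax? s "-" 1).getD []) 1),
         pvLastField segments (fun s => PySem.Str.startswith (PySem.Str.lower s) "lifp-")
            (fun s => PySem.List.pyGet? ((PySem.Str.splitMax? s "-" 1).getD []) 1)]
      let parts := (fields.filterMap id).filter (fun p => p != "")
      if parts.isEmpty then none else some (PySem.Str.join " / " parts)

-- ===== PRECONDITION & SPEC =====
def Spec_parse_l3out_binding_py (dn : Option String) (out : Option String) : Prop := out = parse_l3out_binding_py_alt dn
instance (dn : Option String) (out : Option String) : Decidable (Spec_parse_l3out_binding_py dn out) := by unfold Spec_parse_l3out_binding_py; infer_instance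

-- ===== CLAIM (what is proved, stated in full; the proofs are below) =====
def Claim_equal_parse_l3out_binding_py : Prop := ∀ (dn : Option String), Dom_parse_l3out_binding_py dn → Spec_parse_l3out_binding_py dn (parse_l3out_binding_py dn)

-- ===== LEMMAS AND PROOFS =====

-- the first two lowercased characters identify which branch a segment can take
lemma pvTake2_tn (s : String) (h : PySem.Str.startswith s "tn-" = true) :
    (PySem.Chars.lower s.toList).take 2 = ['t', 'n'] := by
  simp only [PySem.Str.startswith, PySem.Chars.startswith] at h
  obtain ⟨t, ht⟩ := List.isPrefixOf_iff_prefix.mp h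
  rw [show ("tn-".toList = ['t','n','-']) from rfl] at ht
  rw [← ht]
  simp [PySem.Chars.lower]
  decide

lemma pvTake2_out (s : String) (h : PySem.Str.startswith s "out-" = true) :
    (PySem.Chars.lower s.toList).take 2 = ['o', 'u'] := by
  simp only [PySem.Str.startswith, PySem.Chars.startswith] at h
  obtain ⟨t, ht⟩ := List.isPrefixOf_iff_prefix.mp h
  rw [show ("out-".toList = ['o','u','t','-']) from rfl] at ht
  rw [← ht]
  simp [PySem.Chars.lower]
  decide

lemma pvTake2_ln (s : String) (h : PySem.Str.startswith (PySem.Str.lower s) "lnodep-" = true) :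
    (PySem.Chars.lower s.toList).take 2 = ['l', 'n'] := by
  simp only [PySem.Str.startswith, PySem.Chars.startswith, PySem.Str.toList_lower] at h
  obtain ⟨t, ht⟩ := List.isPrefixOf_iff_prefix.mp h
  rw [show ("lnodep-".toList = ['l','n','o','d','e','p','-']) from rfl] at ht
  rw [← ht]
  rfl

lemma pvTake2_li (s : String) (h : PySem.Str.startswith (PySem.Str.lower s) "lifp-" = true) :
    (PySem.Chars.lower s.toList).take 2 = ['l', 'i'] := by
  simp only [PySem.Str.startswith, PySem.Chars.startswith, PySem.Str.toList_lower] at h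
  obtain ⟨t, ht⟩ := List.isPrefixOf_iff_prefix.mp h
  rw [show ("lifp-".toList = ['l','i','f','p','-']) from rfl] at ht
  rw [← ht]
  rfl


-- a fold whose step sets a component to f s exactly when q s holds, and leaves it
-- unchanged otherwise, ends with that component = f of the last matching element
lemma pvComp_foldl {σ : Type} (step : σ → String → σ) (proj : σ → Option String)
    (q : String → Bool) (f : String → Option String)
    (h : ∀ st s, proj (step st s) = if q s then f s else proj st) :
    ∀ (segs : List String) (st : σ),
      proj (segs.foldl step st) = ((segs.reverse.find? q).map f).getD (proj st) := by
  intro segs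
  induction segs with
  | nil => intro st; rfl
  | cons s rest ih =>
    intro st
    rw [List.foldl_cons, ih, List.reverse_cons, List.find?_append]
    cases hf : rest.reverse.find? q with
    | some v => simp
    | none =>
      rw [h]
      by_cases hq : q s = true
      · simp [List.find?, hq]
      · simp [List.find?, hq]

lemma pvStep1 : ∀ st s, (pvAStep st s).1 =
    if PySem.Str.startswith s "tn-" = true then some (PySem.Str.slice s (some 3) none) else st.1 := by
  intro st s
  simp only [pvAStep]
  split_ifs <;> rfl

lemma pvStep2 : ∀ st s, (pvAStep st s).2.1 =
    if PySem.Str.startswith s "out-" = true then some (PySem.Str.slice s (some 4) none) else st.2.1 := by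
  intro st s
  by_cases h1 : PySem.Str.startswith s "tn-" = true
  · have h2 : ¬ PySem.Str.startswith s "out-" = true := fun hb => by
      have t2 := pvTake2_out s hb
      rw [pvTake2_tn s h1] at t2
      exact absurd t2 (by decide)
    simp only [pvAStep]
    rw [if_pos h1, if_neg h2]
  · by_cases h2 : PySem.Str.startswith s "out-" = true
    · simp only [pvAStep]
      rw [if_neg h1, if_pos h2, if_pos h2]
    · simp only [pvAStep]
      rw [if_neg h1, if_neg h2, if_neg h2]
      split_ifs <;> rfl

lemma pvStep3 : ∀ st s, (pvAStep st s).2.2.1 =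
    if PySem.Str.startswith (PySem.Str.lower s) "lnodep-" = true then
      PySem.List.pyGet? ((PySem.Str.splitMax? s "-" 1).getD []) 1
    else st.2.2.1 := by
  intro st s
  by_cases h1 : PySem.Str.startswith s "tn-" = true
  · have h3 : ¬ PySem.Str.startswith (PySem.Str.lower s) "lnodep-" = true := fun hb => by
      have t2 := pvTake2_ln s hb
      rw [pvTake2_tn s h1] at t2
      exact absurd t2 (by decide)
    simp only [pvAStep]
    rw [if_pos h1, if_neg h3]
  · by_cases h2 : PySem.Str.startswith s "out-" = true
    · have h3 : ¬ PySem.Str.startswith (PySem.Str.lower s) "lnodep-" = true := fun hb => by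
        have t2 := pvTake2_ln s hb
        rw [pvTake2_out s h2] at t2
        exact absurd t2 (by decide)
      simp only [pvAStep]
      rw [if_neg h1, if_pos h2, if_neg h3]
    · simp only [pvAStep]
      rw [if_neg h1, if_neg h2]
      split_ifs <;> rfl

lemma pvStep4 : ∀ st s, (pvAStep st s).2.2.2 =
    if PySem.Str.startswith (PySem.Str.lower s) "lifp-" = true then
      PySem.List.pyGet? ((PySem.Str.splitMax? s "-" 1).getD []) 1
    else st.2.2.2 := by
  intro st s
  by_cases h4 : PySem.Str.startswith (PySem.Str.lower s) "lifp-" = true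
  · have h1 : ¬ PySem.Str.startswith s "tn-" = true := fun hb => by
      have t2 := pvTake2_li s h4
      rw [pvTake2_tn s hb] at t2
      exact absurd t2 (by decide)
    have h2 : ¬ PySem.Str.startswith s "out-" = true := fun hb => by
      have t2 := pvTake2_li s h4
      rw [pvTake2_out s hb] at t2
      exact absurd t2 (by decide)
    have h3 : ¬ PySem.Str.startswith (PySem.Str.lower s) "lnodep-" = true := fun hb => by
      have t2 := pvTake2_li s h4
      rw [pvTake2_ln s hb] at t2
      exact absurd t2 (by decide)
    simp only [pvAStep]
    rw [if_neg h1, if_neg h2, if_neg h3, if_pos h4, if_pos h4]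
  · simp only [pvAStep]
    rw [if_neg h4, if_neg h4]
    split_ifs <;> rfl

lemma pvLastField_eq (segs : List String) (q : String → Bool) (f : String → Option String) :
    pvLastField segs q f = ((segs.reverse.find? q).map f).getD none := by
  unfold pvLastField
  cases h : segs.reverse.find? q <;> simp

-- ===== VERDICT (by name: the statement is the Claim_ definition above) =====
theorem parse_l3out_binding_py_spec : Claim_equal_parse_l3out_binding_py := by
  intro dn _
  unfold Spec_parse_l3out_binding_py
  cases dn with
  | none => rfl
  | some d =>
    simp only [parse_l3out_binding_py, parse_l3out_binding_py_alt]
    by_cases hg : (d == "" || !(PySem.Str.isIn "out-" d)) = true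
    · rw [if_pos hg, if_pos hg]
    · rw [if_neg hg, if_neg hg]
      have e1 := pvComp_foldl pvAStep (fun st => st.1) _ _ pvStep1
        ((PySem.Str.split? d "/").getD []) (none, none, none, none)
      have e2 := pvComp_foldl pvAStep (fun st => st.2.1) _ _ pvStep2
        ((PySem.Str.split? d "/").getD []) (none, none, none, none)
      have e3 := pvComp_foldl pvAStep (fun st => st.2.2.1) _ _ pvStep3
        ((PySem.Str.split? d "/").getD []) (none, none, none, none)
      have e4 := pvComp_foldl pvAStep (fun st => st.2.2.2) _ _ pvStep4
        ((PySem.Str.split? d "/").getD []) (none, none, none, none)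
      simp only [pvLastField_eq]
      rw [e1, e2, e3, e4]
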